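-- pv_equiv track=rewrite | github.com/BurnySc2/Advent-of-Code-2025-Solutions | src/AoC2024/day19/solution.py | solve
-- ===== SOURCE A (Python) =====
-- from functools import cache
--
-- def solve(input_text: str) -> tuple[int, int]:
--     lines = input_text.splitlines()
--     words = [w.strip() for w in lines[0].split(",")]
--     sequences = lines[2:]
--
--     @cache
--     def dfs(remaining_sequence: str) -> int:
--         count = 0
--         for word in words:
--             if len(remaining_sequence) <= len(word):
--                 if remaining_sequence == word:
--                     count += 1
--                 continue
--             if remaining_sequence.startswith(word):
--                 count += dfs(remaining_sequence[len(word) :])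
--         return count
--
--     answer_part1 = 0
--     answer_part2 = 0
--     for sequence in sequences:
--         count = dfs(sequence)
--         if 0 < count:
--             answer_part1 += 1
--             answer_part2 += count
--
--     return answer_part1, answer_part2
-- ===== SOURCE B (Python) =====
-- def solve(input_text: str) -> tuple[int, int]:
--     lines = input_text.splitlines()
--     words = [w.strip() for w in lines[0].split(",")]
--     sequences = lines[2:]
--
--     answer_part1 = 0
--     answer_part2 = 0
--     for s in sequences:
--         if not s:
--             continue
--         n = len(s)
--         # forward "push" DP: dp[j] = arrangements of the prefix s[:j] found so far
--         dp = [1] + [0] * n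
--         for i in range(n):
--             for w in words:
--                 if s.startswith(w, i):
--                     dp[i + len(w)] += dp[i]
--         count = dp[n]
--         if 0 < count:
--             answer_part1 += 1
--             answer_part2 += count
--     return answer_part1, answer_part2
-- ===== Notes on version B (the rewrite author's own statement) =====
-- stated objective: alternative
-- what changed: Replaces the memoized top-down recursion over suffixes with a forward push-style DP table per design (dp[j] = arrangements of the prefix s[:j]; each word matched at i pushes dp[i] to dp[i+len(w)]), skipping blank design lines; parsing and accumulation unchanged.
-- outside the precondition, e.g. on solve('a,,\nz\n\n'): A returns (1, 2), B returns (0, 0)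
import Mathlib
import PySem

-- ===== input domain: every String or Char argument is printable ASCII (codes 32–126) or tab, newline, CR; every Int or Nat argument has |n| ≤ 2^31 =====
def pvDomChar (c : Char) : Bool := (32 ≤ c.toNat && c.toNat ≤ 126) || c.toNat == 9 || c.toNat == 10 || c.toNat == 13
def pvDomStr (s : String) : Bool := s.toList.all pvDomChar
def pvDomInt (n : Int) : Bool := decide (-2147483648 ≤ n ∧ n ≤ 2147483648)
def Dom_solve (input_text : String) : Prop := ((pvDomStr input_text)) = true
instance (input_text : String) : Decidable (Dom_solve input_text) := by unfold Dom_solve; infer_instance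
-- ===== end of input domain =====

-- B replaces A's memoized top-down recursion over suffixes with a forward push-style DP
-- table per design (objective: alternative decomposition, same cost).

-- ===== PORT A =====
-- A's recursive dfs ('@cache' only memoizes; values are unchanged). The fuel argument
-- (rem.length + 1 at the top-level call) is a termination guard only: on inputs admitted by
-- Pre_solve every recursive step strictly shortens rem, so the fuel is never exhausted there.
def pvDfsA (words : List (List Char)) : Nat → List Char → Int
  | 0, _ => 0
  | fuel+1, rem =>
    words.foldl (fun c wl =>
      if rem.length ≤ wl.length then (if rem = wl then c + 1 else c)
      else if PySem.Chars.startswith rem wl then c + pvDfsA words fuel (rem.drop wl.length)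
      else c) 0

def solve (input_text : String) : Int × Int :=
  let lines := PySem.Str.splitlines input_text
  match PySem.List.pyGet? lines (0 : Int) with
  | none => (0, 0)   -- Python: lines[0] raises IndexError (excluded by Pre_solve)
  | some line0 =>
    let words := (((PySem.Str.split? line0 ",").getD []).map PySem.Str.strip).map String.toList
    let sequences := PySem.List.slice lines (some (2 : Int)) none
    sequences.foldl (fun (acc : Int × Int) seq =>
      let count := pvDfsA words (seq.toList.length + 1) seq.toList
      if 0 < count then (acc.1 + 1, acc.2 + count) else acc) (0, 0)

-- ===== PORT B =====
-- one Python step 'if s.startswith(w, i): dp[i + len(w)] += dp[i]'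
def pvPush (s : List Char) (dp : List Int) (i : Nat) (w : List Char) : List Int :=
  if PySem.Chars.startswith (s.drop i) w then
    dp.set (i + w.length) (dp.getD (i + w.length) 0 + dp.getD i 0)
  else dp

def solve_alt (input_text : String) : Int × Int :=
  let lines := PySem.Str.splitlines input_text
  match PySem.List.pyGet? lines (0 : Int) with
  | none => (0, 0)   -- Python: lines[0] raises IndexError (excluded by Pre_solve)
  | some line0 =>
    let words := (((PySem.Str.split? line0 ",").getD []).map PySem.Str.strip).map String.toList
    let sequences := PySem.List.slice lines (some (2 : Int)) none
    sequences.foldl (fun (acc : Int × Int) seq =>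
      if seq = "" then acc   -- 'if not s: continue'
      else
        let s := seq.toList
        let n := s.length
        let dp := (List.range n).foldl
          (fun dp i => words.foldl (fun dp w => pvPush s dp i w) dp)
          (1 :: List.replicate n 0)   -- dp = [1] + [0] * n
        let count := dp.getD n 0
        if 0 < count then (acc.1 + 1, acc.2 + count) else acc) (0, 0)

-- ===== PRECONDITION & SPEC =====
-- Pre_solve excludes the empty input (lines[0] raises IndexError) and inputs whose
-- comma-split towel line contains an empty token while design lines exist: there A raises
-- RecursionError as soon as some design line is nonempty, and on blank design lines its
-- count (the number of empty tokens) is an accident of the equality shortcut in dfs, a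
-- corner no one would specify.
def Pre_solve (input_text : String) : Prop :=
  PySem.Str.splitlines input_text ≠ [] ∧
  ("" ∈ ((PySem.Str.split? ((PySem.Str.splitlines input_text).headD "") ",").getD []).map
      PySem.Str.strip → (PySem.Str.splitlines input_text).drop 2 = [])
instance (input_text : String) : Decidable (Pre_solve input_text) := by
  unfold Pre_solve; infer_instance
def pvWitness_solve : String := "a,ab\n\naab"

def Spec_solve (input_text : String) (out : Int × Int) : Prop := out = solve_alt input_text
instance (input_text : String) (out : Int × Int) : Decidable (Spec_solve input_text out) := by
  unfold Spec_solve; infer_instance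

-- ===== CLAIM (what is proved, stated in full; the proofs are below) =====
def Claim_equal_solve : Prop := ∀ (input_text : String), Dom_solve input_text → Pre_solve input_text → Spec_solve input_text (solve input_text)

-- ===== LEMMAS AND PROOFS =====

-- A's dfs value with ample fuel: the reference count of arrangements of rem
def pvCnt (W : List (List Char)) (rem : List Char) : Int := pvDfsA W (rem.length + 1) rem

-- value of one table cell j: arrangements of the suffix s[j:], with cell n pinned to 1
def pvNval (W : List (List Char)) (s : List Char) (j : Nat) : Int :=
  if j = s.length then 1 else pvCnt W (s.drop j)

-- the invariant functional: Σ_{j=i}^{n} dp[j] * pvNval j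
def pvS (W : List (List Char)) (s : List Char) (dp : List Int) (i : Nat) : Int :=
  ((List.range' i (s.length + 1 - i)).map (fun j => dp.getD j 0 * pvNval W s j)).sum

-- fuel irrelevance: with no empty word, any fuel above rem.length computes the same value
lemma pvDfsA_fuel (W : List (List Char)) (hne : [] ∉ W) :
    ∀ n, ∀ rem : List Char, rem.length = n → ∀ f1 f2, n < f1 → n < f2 →
      pvDfsA W f1 rem = pvDfsA W f2 rem := by
  intro n
  induction n using Nat.strong_induction_on with
  | _ n ih =>
    intro rem hn f1 f2 h1 h2
    match f1, f2 with
    | a+1, b+1 =>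
      simp only [pvDfsA]
      apply PySem.List.foldl_congr_mem
      intro acc wl hwl
      by_cases hle : rem.length ≤ wl.length
      · simp [hle]
      · simp only [if_neg hle]
        by_cases hsw : PySem.Chars.startswith rem wl = true
        · simp only [if_pos hsw]
          congr 1
          have hwlne : wl ≠ [] := fun h => hne (h ▸ hwl)
          have hwlpos : 0 < wl.length := List.length_pos_iff.mpr hwlne
          have hlt : (rem.drop wl.length).length < n := by simp; omega
          exact ih _ hlt _ rfl a b (by omega) (by omega)
        · simp [hsw]

lemma pvCnt_eq_fuel (W : List (List Char)) (hne : [] ∉ W) (rem : List Char) (f : Nat)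
    (hf : rem.length < f) : pvDfsA W f rem = pvCnt W rem :=
  pvDfsA_fuel W hne rem.length rem rfl f (rem.length + 1) hf (Nat.lt_succ_self _)

-- dfs on the empty design counts the empty words, hence 0 here
lemma pvDfsA_nil (W : List (List Char)) (hne : [] ∉ W) : pvDfsA W 1 [] = 0 := by
  rw [pvDfsA]
  have : ∀ acc : Int, ∀ wl ∈ W,
      (if ([] : List Char).length ≤ wl.length then (if ([] : List Char) = wl then acc + 1 else acc)
       else if PySem.Chars.startswith [] wl then acc + pvDfsA W 0 ([].drop wl.length)
       else acc) = acc := by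
    intro acc wl hwl
    have : ([] : List Char) ≠ wl := fun h => hne (h ▸ hwl)
    simp [this]
  calc W.foldl _ 0 = W.foldl (fun (c : Int) _ => c) 0 :=
        PySem.List.foldl_congr_mem _ _ _ _ (fun acc wl h => this acc wl h)
    _ = 0 := by induction W <;> simp_all

-- A's recursion written as a sum over the word list
lemma pvCnt_unfold (W : List (List Char)) (hne : [] ∉ W) (s : List Char) (i : Nat)
    (hi : i < s.length) :
    pvCnt W (s.drop i) =
      (W.map (fun w => if PySem.Chars.startswith (s.drop i) w then pvNval W s (i + w.length)
        else 0)).sum := by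
  have hlen : (s.drop i).length = s.length - i := by simp
  rw [pvCnt, pvDfsA]
  have hcg : ∀ acc : Int, ∀ w ∈ W,
      (if (s.drop i).length ≤ w.length then (if s.drop i = w then acc + 1 else acc)
       else if PySem.Chars.startswith (s.drop i) w then
         acc + pvDfsA W (s.drop i).length ((s.drop i).drop w.length)
       else acc) =
      acc + (if PySem.Chars.startswith (s.drop i) w then pvNval W s (i + w.length) else 0) := by
    intro acc w hw
    by_cases hle : (s.drop i).length ≤ w.length
    · simp only [if_pos hle]
      by_cases heq : s.drop i = w
      · have hsw : PySem.Chars.startswith (s.drop i) w = true := by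
          rw [heq]; simp [PySem.Chars.startswith_iff]
        have hlw : i + w.length = s.length := by
          rw [← heq, hlen]; omega
        rw [if_pos heq, if_pos hsw, hlw]
        simp [pvNval]
      · have hsw : PySem.Chars.startswith (s.drop i) w = false := by
          rw [Bool.eq_false_iff]
          intro hsw
          have hp := (PySem.Chars.startswith_iff _ _).mp hsw
          exact heq (hp.eq_of_length (by have := hp.length_le; omega)).symm
        simp [heq, hsw]
    · simp only [if_neg hle]
      by_cases hsw : PySem.Chars.startswith (s.drop i) w = true
      · have hwlen : w.length ≤ (s.drop i).length :=
          ((PySem.Chars.startswith_iff _ _).mp hsw).length_le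
        have hwn : i + w.length < s.length := by omega
        have hstep : pvDfsA W (s.drop i).length ((s.drop i).drop w.length) =
            pvCnt W ((s.drop i).drop w.length) := by
          apply pvCnt_eq_fuel W hne
          have hwne : w ≠ [] := fun h => hne (h ▸ hw)
          have : 0 < w.length := List.length_pos_iff.mpr hwne
          simp; omega
        rw [hstep, List.drop_drop]
        have hcomm : w.length + i = i + w.length := by omega
        simp [hsw, pvNval, Nat.ne_of_lt hwn]
      · simp [hsw]
  calc W.foldl _ 0
      = W.foldl (fun acc w =>
          acc + (if PySem.Chars.startswith (s.drop i) w then pvNval W s (i + w.length) else 0)) 0 :=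
        PySem.List.foldl_congr_mem _ _ _ _ (fun acc w h => hcg acc w h)
    _ = _ := by rw [PySem.List.foldl_add]; ring

lemma pvGetD_set_ne (dp : List Int) (k j : Nat) (v : Int) (h : j ≠ k) :
    (dp.set k v).getD j 0 = dp.getD j 0 := by
  simp [List.getD, List.getElem?_set_ne (Ne.symm h)]

lemma pvGetD_set_self (dp : List Int) (k : Nat) (v : Int) (h : k < dp.length) :
    (dp.set k v).getD k 0 = v := by
  simp [List.getD, h]

-- effect of one dp.set on the invariant sum
lemma pvSum_set (g : Nat → Int) (dp : List Int) (k : Nat) (v : Int) :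
    ∀ (m i : Nat), i ≤ k → k < i + m → k < dp.length →
    ((List.range' i m).map (fun j => (dp.set k v).getD j 0 * g j)).sum
      = ((List.range' i m).map (fun j => dp.getD j 0 * g j)).sum + (v - dp.getD k 0) * g k := by
  intro m
  induction m with
  | zero => intro i h1 h2; omega
  | succ m ih =>
    intro i h1 h2 h3
    rw [List.range'_succ, List.map_cons, List.map_cons, List.sum_cons, List.sum_cons]
    by_cases hik : i = k
    · subst hik
      rw [pvGetD_set_self dp i v h3]
      have htail : ((List.range' (i+1) m).map (fun j => (dp.set i v).getD j 0 * g j)).sum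
          = ((List.range' (i+1) m).map (fun j => dp.getD j 0 * g j)).sum := by
        apply congrArg
        apply List.map_congr_left
        intro j hj
        have : i + 1 ≤ j := (List.mem_range'_1.mp hj).1
        rw [pvGetD_set_ne dp i j v (by omega)]
      rw [htail]; ring
    · rw [pvGetD_set_ne dp k i v hik, ih (i+1) (by omega) (by omega) h3]
      ring

-- split off the head cell of the invariant sum
lemma pvS_split (W : List (List Char)) (s : List Char) (dp : List Int) (i : Nat)
    (hi : i ≤ s.length) :
    pvS W s dp i = dp.getD i 0 * pvNval W s i + pvS W s dp (i+1) := by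
  unfold pvS
  have : s.length + 1 - i = (s.length - i) + 1 := by omega
  rw [this, List.range'_succ, List.map_cons, List.sum_cons]
  have : s.length + 1 - (i+1) = s.length - i := by omega
  rw [this]

-- the inner word loop: lengths and earlier cells preserved, the sum grows by dp[i] * Σ pushes
lemma pvInner (W : List (List Char)) (s : List Char) (i : Nat) :
    ∀ (L : List (List Char)), (∀ w ∈ L, w ≠ []) → ∀ dp : List Int,
      dp.length = s.length + 1 →
      (L.foldl (fun dp w => pvPush s dp i w) dp).length = s.length + 1 ∧
      (L.foldl (fun dp w => pvPush s dp i w) dp).getD i 0 = dp.getD i 0 ∧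
      pvS W s (L.foldl (fun dp w => pvPush s dp i w) dp) (i+1)
        = pvS W s dp (i+1) + dp.getD i 0 *
            (L.map (fun w => if PySem.Chars.startswith (s.drop i) w then pvNval W s (i + w.length)
              else 0)).sum := by
  intro L
  induction L with
  | nil => intro _ dp hdp; simp [hdp]
  | cons w L' ih =>
    intro hne dp hdp
    rw [List.foldl_cons]
    by_cases hsw : PySem.Chars.startswith (s.drop i) w = true
    · have hwne : w ≠ [] := hne w (List.mem_cons_self ..)
      have hwpos : 0 < w.length := List.length_pos_iff.mpr hwne
      have hwlen : w.length ≤ (s.drop i).length :=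
        ((PySem.Chars.startswith_iff _ _).mp hsw).length_le
      have hsl : (s.drop i).length = s.length - i := by simp
      have hilen : i ≤ s.length := by rw [hsl] at hwlen; omega
      have hk : i + w.length < dp.length := by rw [hdp]; omega
      have hpush : pvPush s dp i w
          = dp.set (i + w.length) (dp.getD (i + w.length) 0 + dp.getD i 0) := by
        simp [pvPush, hsw]
      obtain ⟨hl, hg, hs⟩ := ih (fun u hu => hne u (List.mem_cons_of_mem _ hu))
        (pvPush s dp i w) (by rw [hpush, List.length_set, hdp])
      refine ⟨hl, ?_, ?_⟩
      · rw [hg, hpush, pvGetD_set_ne dp _ i _ (by omega)]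
      · rw [hs, hpush, pvGetD_set_ne dp _ i _ (by omega)]
        unfold pvS
        rw [pvSum_set (pvNval W s) dp (i + w.length) _ (s.length + 1 - (i+1)) (i+1)
          (by omega) (by omega) hk]
        rw [List.map_cons, List.sum_cons, if_pos hsw]
        ring
    · have hpush : pvPush s dp i w = dp := by simp [pvPush, hsw]
      rw [hpush]
      obtain ⟨hl, hg, hs⟩ := ih (fun u hu => hne u (List.mem_cons_of_mem _ hu)) dp hdp
      refine ⟨hl, hg, ?_⟩
      rw [hs, List.map_cons, List.sum_cons, if_neg (by simpa using hsw)]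
      ring

-- all cells of the initial table beyond 0 are 0
lemma pvInit_getD (n j : Nat) (hj : 1 ≤ j) :
    ((1 : Int) :: List.replicate n 0).getD j 0 = 0 := by
  match j, hj with
  | j+1, _ =>
    show (List.replicate n (0 : Int)).getD j 0 = 0
    rcases Nat.lt_or_ge j n with h | h
    · rw [List.getD_eq_getElem _ _ (by simpa using h)]; simp
    · rw [List.getD_eq_default _ _ (by simpa using h)]

-- outer loop invariant: pvS stays equal to the arrangement count of the whole design
lemma pvOuter (W : List (List Char)) (hne : [] ∉ W) (s : List Char) (hs : s ≠ []) :
    ∀ i, i ≤ s.length →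
      ((List.range i).foldl (fun dp i => W.foldl (fun dp w => pvPush s dp i w) dp)
          ((1 : Int) :: List.replicate s.length 0)).length = s.length + 1 ∧
      pvS W s ((List.range i).foldl (fun dp i => W.foldl (fun dp w => pvPush s dp i w) dp)
          ((1 : Int) :: List.replicate s.length 0)) i = pvCnt W s := by
  intro i
  induction i with
  | zero =>
    intro _
    refine ⟨by simp, ?_⟩
    rw [List.range_zero, List.foldl_nil, pvS_split W s _ 0 (Nat.zero_le _)]
    have h0 : ((1 : Int) :: List.replicate s.length 0).getD 0 0 = 1 := rfl
    have hn0 : pvNval W s 0 = pvCnt W s := by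
      have : (0 : Nat) ≠ s.length := by
        have := List.length_pos_iff.mpr hs; omega
      simp [pvNval, this]
    have htail : pvS W s ((1 : Int) :: List.replicate s.length 0) 1 = 0 := by
      unfold pvS
      have : ∀ j ∈ List.range' 1 (s.length + 1 - 1),
          ((1 : Int) :: List.replicate s.length 0).getD j 0 * pvNval W s j = 0 := by
        intro j hj
        rw [pvInit_getD s.length j (List.mem_range'_1.mp hj).1]; ring
      rw [List.sum_eq_zero (by
        intro x hx
        obtain ⟨j, hj, rfl⟩ := List.mem_map.mp hx
        exact this j hj)]
    rw [h0, hn0, htail]; ring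
  | succ i ih =>
    intro hle
    have hi : i < s.length := by omega
    obtain ⟨hlen, hsum⟩ := ih (by omega)
    rw [List.range_succ, List.foldl_append, List.foldl_cons, List.foldl_nil]
    have hneW : ∀ w ∈ W, w ≠ [] := fun w hw h => hne (h ▸ hw)
    obtain ⟨hl, hg, hs'⟩ := pvInner W s i W hneW _ hlen
    refine ⟨hl, ?_⟩
    rw [pvS_split W s _ i (by omega)] at hsum
    rw [hs', ← pvCnt_unfold W hne s i hi]
    have : pvCnt W (s.drop i) = pvNval W s i := by
      simp [pvNval, Nat.ne_of_lt hi]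
    rw [this, ← hsum]
    ring

-- per-design equality for a nonempty design
lemma pvCount_eq (W : List (List Char)) (hne : [] ∉ W) (s : List Char) (hs : s ≠ []) :
    pvDfsA W (s.length + 1) s =
      ((List.range s.length).foldl (fun dp i => W.foldl (fun dp w => pvPush s dp i w) dp)
          ((1 : Int) :: List.replicate s.length 0)).getD s.length 0 := by
  obtain ⟨hlen, hsum⟩ := pvOuter W hne s hs s.length (le_refl _)
  rw [pvS_split W s _ s.length (le_refl _)] at hsum
  have hnv : pvNval W s s.length = 1 := by simp [pvNval]
  have htail : ∀ dp : List Int, pvS W s dp (s.length + 1) = 0 := by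
    intro dp; unfold pvS; simp
  rw [hnv, htail _] at hsum
  show pvCnt W s = _
  rw [← hsum]; ring

-- ===== VERDICT (by name: the statement is the Claim_ definition above) =====
theorem solve_spec : Claim_equal_solve := by
  intro input_text _dom hpre
  obtain ⟨hnz, himp⟩ := hpre
  unfold Spec_solve solve solve_alt
  rcases hlines : PySem.Str.splitlines input_text with _ | ⟨line0, rest⟩
  · exact absurd hlines hnz
  · rw [hlines] at himp
    simp only [List.headD_cons] at himp
    have hget : PySem.List.pyGet? (line0 :: rest) (0 : Int) = some line0 := by
      simp [PySem.List.pyGet?, PySem.List.pyIdx?]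
    simp only [hget]
    have hslice : PySem.List.slice (line0 :: rest) (some (2 : Int)) none
        = (line0 :: rest).drop 2 := by simp [pysem]
    by_cases hmem : "" ∈ ((PySem.Str.split? line0 ",").getD []).map PySem.Str.strip
    · rw [hslice, himp hmem]
      simp
    · have hneW : ([] : List Char) ∉ (((PySem.Str.split? line0 ",").getD []).map
          PySem.Str.strip).map String.toList := by
        intro hw
        rcases List.mem_map.mp hw with ⟨w, hwmem, hwl⟩
        exact hmem ((String.toList_eq_nil_iff.mp hwl) ▸ hwmem)
      apply PySem.List.foldl_congr_mem
      intro acc seq _hseq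
      dsimp only []
      by_cases hseq0 : seq = ""
      · have : seq.toList = [] := by simp [hseq0]
        rw [if_pos hseq0, this]
        simp only [List.length_nil, Nat.zero_add]
        rw [pvDfsA_nil _ hneW]
        simp
      · have hsl : seq.toList ≠ [] := by
          simpa [String.toList_eq_nil_iff] using hseq0
        rw [if_neg hseq0, pvCount_eq _ hneW seq.toList hsl]
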